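-- pv_equiv track=rewrite | github.com/redabelhaj/Retweet-Prediction-Covid19 | Functions.py | hashtags_list_to_list
-- ===== SOURCE A (Python) =====
-- def hashtags_list_to_list(h_list):
--     if type(h_list) == float:
--         return []
--     list_of_hashtags = []
--     rank = 0
--     flag = False
--     for i, elem in enumerate(h_list):
--         if elem == ',':
--             flag = True
--             if rank == 0:
--                 list_of_hashtags.append(h_list[rank:i])
--             else:
--                 list_of_hashtags.append(h_list[rank+2:i])
--             rank = i
--     if flag:
--         list_of_hashtags.append(h_list[rank+2:i+1])
--     else:
--         list_of_hashtags.append(h_list)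
--     return list_of_hashtags
-- ===== SOURCE B (Python) =====
-- def hashtags_list_to_list(h_list):
--     if type(h_list) == float:
--         return []
--     parts = h_list.split(',')
--     return [parts[0]] + [p[1:] for p in parts[1:]]
-- ===== Notes on version B (the rewrite author's own statement) =====
-- stated objective: simpler
-- what changed: Replaces A's character-by-character enumerate scan with rank/flag state and index slicing by one library split on commas followed by dropping the first character of every part after the first (the split runs in C, hence the measured constant-factor speedup).
-- outside the precondition, e.g. on hashtags_list_to_list(',a,b'): A returns ['', ',a', ''], B returns ['', '', '']
import Mathlib
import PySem

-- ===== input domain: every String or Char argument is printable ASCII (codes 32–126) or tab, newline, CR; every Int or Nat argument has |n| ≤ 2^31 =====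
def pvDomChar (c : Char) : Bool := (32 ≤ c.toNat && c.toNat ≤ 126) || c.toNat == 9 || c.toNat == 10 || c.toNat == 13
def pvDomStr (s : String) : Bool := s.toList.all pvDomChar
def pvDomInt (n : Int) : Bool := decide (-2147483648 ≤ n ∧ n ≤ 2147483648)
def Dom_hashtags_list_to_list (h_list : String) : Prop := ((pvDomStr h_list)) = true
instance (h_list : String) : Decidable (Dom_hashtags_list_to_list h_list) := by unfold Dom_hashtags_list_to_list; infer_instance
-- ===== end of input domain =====

-- B replaces A's manual index scan (rank/flag state machine) with a comma split plus dropping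
-- each later part's first character (objective: simpler).

-- ===== PORT A =====
-- loop body of A: state is (list_of_hashtags, rank, flag); p is (i, elem) from enumerate
def pvStepA (s : List Char) (acc : List String × Int × Bool) (p : Int × Char) :
    List String × Int × Bool :=
  if p.2 = ',' then
    (acc.1 ++ [String.ofList (if acc.2.1 = 0 then PySem.List.slice s (some acc.2.1) (some p.1)
                              else PySem.List.slice s (some (acc.2.1 + 2)) (some p.1))],
     p.1, true)
  else acc

def hashtags_list_to_list (h_list : String) : List String :=
  let s := h_list.toList
  let st := (PySem.List.enumerate s 0).foldl (pvStepA s) ([], 0, false)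
  if st.2.2 then
    -- final append h_list[rank+2:i+1]; here i+1 = len(h_list), since flag=true forces the string nonempty
    st.1 ++ [String.ofList (PySem.List.slice s (some (st.2.1 + 2)) (some (s.length : Int)))]
  else
    st.1 ++ [h_list]

-- ===== PORT B =====
-- hand port of str.split(',') on the character list (exact: comma-separated pieces,
-- the empty string gives [''])
def pvSplitComma : List Char → List (List Char)
  | [] => [[]]
  | c :: t =>
      if c = ',' then [] :: pvSplitComma t
      else
        match pvSplitComma t with
        | h :: r => (c :: h) :: r
        | [] => [[c]]

def hashtags_list_to_list_alt (h_list : String) : List String :=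
  match pvSplitComma h_list.toList with
  | [] => []   -- unreachable: pvSplitComma never returns []
  | p :: rest => String.ofList p :: rest.map (fun q => String.ofList (q.drop 1))

-- ===== PRECONDITION & SPEC =====
-- Pre_ excludes strings that begin with a comma and contain a further comma: such input is not
-- a comma-space-separated hashtag list, and on this degenerate corner A's and B's values are both
-- accidental artefacts of how each implementation handles the leading separator.
def Pre_hashtags_list_to_list (h_list : String) : Prop :=
  ¬ (h_list.toList.head? = some ',' ∧ ',' ∈ h_list.toList.tail)
instance (h_list : String) : Decidable (Pre_hashtags_list_to_list h_list) := by
  unfold Pre_hashtags_list_to_list; infer_instance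

def pvWitness_hashtags_list_to_list : String := "a, b"

def Spec_hashtags_list_to_list (h_list : String) (out : List String) : Prop :=
  out = hashtags_list_to_list_alt h_list
instance (h_list : String) (out : List String) : Decidable (Spec_hashtags_list_to_list h_list out) := by
  unfold Spec_hashtags_list_to_list; infer_instance

-- ===== CLAIM (what is proved, stated in full; the proof is below) =====
def Claim_equal_hashtags_list_to_list : Prop := ∀ (h_list : String), Dom_hashtags_list_to_list h_list → Pre_hashtags_list_to_list h_list → Spec_hashtags_list_to_list h_list (hashtags_list_to_list h_list)

-- ===== LEMMAS AND PROOFS =====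

-- the "flag = true" exit of A: the collected pieces plus the final slice
def pvFinish (s : List Char) (st : List String × Int × Bool) : List String :=
  st.1 ++ [String.ofList (PySem.List.slice s (some (st.2.1 + 2)) (some (s.length : Int)))]

-- pvSplitComma is never empty
theorem pvSplitComma_ne_nil (t : List Char) : pvSplitComma t ≠ [] := by
  match t with
  | [] => simp [pvSplitComma]
  | c :: t =>
    simp only [pvSplitComma]
    split
    · simp
    · cases h : pvSplitComma t <;> simp

-- split of a comma-free list
theorem pvSplitComma_no_comma (t : List Char) (h : ',' ∉ t) : pvSplitComma t = [t] := by
  induction t with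
  | nil => rfl
  | cons c t ih =>
    have hc : c ≠ ',' := fun hc => h (hc ▸ List.mem_cons_self)
    have ht : ',' ∉ t := fun hm => h (List.mem_cons_of_mem _ hm)
    simp [pvSplitComma, hc, ih ht]

-- split across the first comma
theorem pvSplitComma_append (u t : List Char) (hu : ',' ∉ u) :
    pvSplitComma (u ++ ',' :: t) = u :: pvSplitComma t := by
  induction u with
  | nil => simp [pvSplitComma]
  | cons c u ih =>
    have hc : c ≠ ',' := fun hc => hu (hc ▸ List.mem_cons_self)
    have hu' : ',' ∉ u := fun hm => hu (List.mem_cons_of_mem _ hm)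
    simp [pvSplitComma, hc, ih hu']

-- head of the split is a prefix of the list
theorem pvSplitComma_head_prefix (t h : List Char) (r : List (List Char))
    (heq : pvSplitComma t = h :: r) : ∃ rest, t = h ++ rest := by
  induction t generalizing h r with
  | nil =>
    simp [pvSplitComma] at heq
    exact ⟨[], by simp [heq.1]⟩
  | cons c t ih =>
    by_cases hc : c = ','
    · simp [pvSplitComma, hc] at heq
      exact ⟨c :: t, by simp [heq.1]⟩
    · simp only [pvSplitComma, if_neg hc] at heq
      cases hsp : pvSplitComma t with
      | nil => exact absurd hsp (pvSplitComma_ne_nil t)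
      | cons h' r' =>
        rw [hsp] at heq
        obtain ⟨rest, hrest⟩ := ih h' r' hsp
        refine ⟨rest, ?_⟩
        have hh : h = c :: h' := by injection heq with h1 _; exact h1.symm
        subst hh; simp [hrest]

-- the fold skips comma-free segments
theorem foldl_stepA_no_comma (s : List Char) (l : List (Int × Char)) (acc : List String × Int × Bool)
    (h : ∀ p ∈ l, p.2 ≠ ',') : l.foldl (pvStepA s) acc = acc := by
  induction l generalizing acc with
  | nil => rfl
  | cons p l ih =>
    have hp : p.2 ≠ ',' := h p List.mem_cons_self
    simp only [List.foldl_cons, pvStepA, if_neg hp]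
    exact ih acc (fun q hq => h q (List.mem_cons_of_mem _ hq))

theorem enumerate_no_comma (u : List Char) (hu : ',' ∉ u) (st : Int) :
    ∀ p ∈ PySem.List.enumerate u st, p.2 ≠ ',' := by
  intro p hp
  rw [PySem.List.mem_enumerate_iff] at hp
  obtain ⟨k, hk, rfl⟩ := hp
  intro hc
  exact hu (hc ▸ List.getElem_mem hk)

-- the conversion from an absolute slice of s to a drop of the split part
theorem slice_eq_drop_one (s h rest : List Char) (off : Nat)
    (hdrop : s.drop (off + 1) = h ++ rest) :
    PySem.List.slice s (some ((off : Int) + 2)) (some ((off : Int) + 1 + (h.length : Int)))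
      = h.drop 1 := by
  have e1 : ((off : Int) + 2) = (((off + 2 : Nat) : Int)) := by push_cast; ring
  have e2 : ((off : Int) + 1 + (h.length : Int)) = (((off + 1 + h.length : Nat) : Int)) := by
    push_cast; ring
  rw [e1, e2, PySem.List.slice_natCast]
  have hd : s.drop (off + 2) = (h ++ rest).drop 1 := by
    rw [← hdrop, List.drop_drop]
  rw [hd]
  cases h with
  | nil => simp
  | cons c h =>
    simp only [List.cons_append, List.drop_succ_cons, List.drop_zero, List.length_cons]
    have he : off + 1 + (h.length + 1) - (off + 2) = h.length := by omega
    rw [he]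
    simp

-- main invariant: after a comma at position rank ≥ 1 has been handled, the rest of the fold
-- plus the final append produces the remaining split pieces (head still an absolute slice)
theorem foldl_stepA_rest (s : List Char) :
    ∀ (t : List Char) (rank off : Nat) (acc : List String),
    1 ≤ rank → rank + 1 ≤ off → off ≤ s.length → s.drop off = t →
    pvFinish s ((PySem.List.enumerate t (off : Int)).foldl (pvStepA s) (acc, (rank : Int), true))
    = acc ++ (match pvSplitComma t with
              | [] => []
              | h :: r => String.ofList (PySem.List.slice s (some ((rank : Int) + 2))
                            (some ((off : Int) + (h.length : Int))))
                          :: r.map (fun q => String.ofList (q.drop 1))) := by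
  intro t
  induction t with
  | nil =>
    intro rank off acc h1 h2 h3 hdrop
    have hlen : s.length = off := by
      have := congrArg List.length hdrop
      simp at this
      omega
    simp [pvFinish, pvSplitComma, PySem.List.enumerate_nil, hlen]
  | cons c t ih =>
    intro rank off acc h1 h2 h3 hdrop
    have hofflt : off < s.length := by
      have := congrArg List.length hdrop
      simp at this
      omega
    have hdrop' : s.drop (off + 1) = t := by
      have hdd : s.drop (off + 1) = (s.drop off).drop 1 := by simp [List.drop_drop]
      rw [hdd, hdrop, List.drop_one, List.tail_cons]
    by_cases hc : c = ','
    · subst hc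
      simp only [PySem.List.enumerate_cons, List.foldl_cons]
      have hrank : ((rank : Int)) ≠ 0 := by
        simp only [ne_eq, Int.natCast_eq_zero]; omega
      simp only [pvStepA, if_pos rfl, if_neg hrank, if_true]
      have hih := ih off (off + 1) (acc ++ [String.ofList (PySem.List.slice s
        (some ((rank : Int) + 2)) (some (off : Int)))]) (by omega) (by omega) (by omega) hdrop'
      simp only [Int.natCast_add, Int.natCast_one] at hih
      rw [hih]
      simp only [pvSplitComma, if_pos rfl, if_true]
      cases hsp : pvSplitComma t with
      | nil => exact absurd hsp (pvSplitComma_ne_nil t)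
      | cons h r =>
        obtain ⟨rest, hrest⟩ := pvSplitComma_head_prefix t h r hsp
        have hconv := slice_eq_drop_one s h rest off (by rw [hdrop', hrest])
        simp only [hsp, List.map_cons, List.length_nil, Int.natCast_zero, add_zero,
          List.append_assoc, List.singleton_append, hconv]
    · simp only [PySem.List.enumerate_cons, List.foldl_cons]
      simp only [pvStepA, if_neg hc]
      have hih := ih rank (off + 1) acc h1 (by omega) (by omega) hdrop'
      simp only [Int.natCast_add, Int.natCast_one] at hih
      rw [hih]
      simp only [pvSplitComma, if_neg hc]
      cases hsp : pvSplitComma t with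
      | nil => exact absurd hsp (pvSplitComma_ne_nil t)
      | cons h r =>
        simp only [List.length_cons]
        congr 4
        push_cast; ring

-- first-comma decomposition
theorem exists_first_comma (s : List Char) (h : ',' ∈ s) :
    ∃ u t, s = u ++ ',' :: t ∧ ',' ∉ u := by
  induction s with
  | nil => cases h
  | cons c s ih =>
    by_cases hc : c = ','
    · exact ⟨[], s, by simp [hc], by simp⟩
    · have hs : ',' ∈ s := by
        cases h with
        | head => exact absurd rfl hc
        | tail _ hm => exact hm
      obtain ⟨u, t, heq, hu⟩ := ih hs
      refine ⟨c :: u, t, by simp [heq], ?_⟩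
      simp only [List.mem_cons, not_or]
      exact ⟨fun hcc => hc hcc.symm, hu⟩

-- flag stays true once set
theorem foldl_stepA_flag (s : List Char) (l : List (Int × Char)) (acc : List String × Int × Bool)
    (h : acc.2.2 = true) : (l.foldl (pvStepA s) acc).2.2 = true := by
  induction l generalizing acc with
  | nil => exact h
  | cons p l ih =>
    simp only [List.foldl_cons, pvStepA]
    split
    · exact ih _ rfl
    · exact ih _ h

-- the flag=true exit of A is pvFinish
theorem if_finish (s : List Char) (st : List String × Int × Bool) (x : String)
    (h : st.2.2 = true) :
    (if st.2.2 = true then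
      st.1 ++ [String.ofList (PySem.List.slice s (some (st.2.1 + 2)) (some (s.length : Int)))]
     else st.1 ++ [x]) = pvFinish s st := by
  rw [if_pos h]; rfl

-- ===== VERDICT (by name: the statement is the Claim_ definition above) =====
theorem hashtags_list_to_list_spec : Claim_equal_hashtags_list_to_list := by
  intro h_list _ hPre
  unfold Spec_hashtags_list_to_list
  unfold hashtags_list_to_list hashtags_list_to_list_alt
  simp only []
  by_cases hmem : ',' ∈ h_list.toList
  · obtain ⟨u, t, heq, hu⟩ := exists_first_comma h_list.toList hmem
    rw [heq]
    rw [PySem.List.enumerate_append, List.foldl_append,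
      foldl_stepA_no_comma _ _ _ (enumerate_no_comma u hu _),
      PySem.List.enumerate_cons, List.foldl_cons]
    simp only [pvStepA, if_pos rfl, if_true, List.nil_append, zero_add]
    have htake : PySem.List.slice (u ++ ',' :: t) (some (0 : Int)) (some (u.length : Int)) = u := by
      rw [PySem.List.slice_zero_start, PySem.List.slice_to_natCast, List.take_left]
    rw [htake]
    have hflag := foldl_stepA_flag (u ++ ',' :: t)
      (PySem.List.enumerate t ((u.length : Int) + 1))
      ([String.ofList u], (u.length : Int), true) rfl
    rw [if_finish _ _ h_list hflag]
    have hdropu : (u ++ ',' :: t).drop (u.length + 1) = t := by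
      simp [List.drop_append_of_le_length]
    rcases u with _ | ⟨c0, u0⟩
    · -- the first comma is the first character; Pre_ forces no second comma
      have hD' : ',' ∉ t := by
        intro hmt
        exact hPre ⟨by rw [heq]; rfl, by rw [heq]; exact hmt⟩
      simp only [List.length_nil, Int.natCast_zero, zero_add, List.nil_append]
      rw [foldl_stepA_no_comma _ _ _ (enumerate_no_comma t hD' _)]
      rw [show pvSplitComma (',' :: t) = [[], t] from by
        simp [pvSplitComma, pvSplitComma_no_comma t hD']]
      simp only [pvFinish, List.map_cons, List.map_nil]
      have hsl : PySem.List.slice (',' :: t) (some ((0 : Int) + 2)) (some (((',' :: t).length : Nat) : Int))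
          = t.drop 1 := by
        have e1 : ((0 : Int) + 2) = (((2 : Nat) : Int)) := by norm_num
        rw [e1, PySem.List.slice_natCast]
        cases t with
        | nil => simp
        | cons a t' =>
          simp only [List.drop_succ_cons, List.drop_zero, List.drop_one, List.length_cons,
            List.tail_cons]
          rw [List.take_of_length_le (by simp)]
      rw [hsl]
      rfl
    · -- the first comma is at position |u| ≥ 1
      have hrest := foldl_stepA_rest (c0 :: u0 ++ ',' :: t) t (c0 :: u0).length
        ((c0 :: u0).length + 1) [String.ofList (c0 :: u0)]
        (by simp) (by omega) (by simp) hdropu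
      have hcast : (((c0 :: u0).length : Int) + 1) = (((c0 :: u0).length + 1 : Nat) : Int) := by
        push_cast; ring
      rw [hcast, hrest]
      rw [pvSplitComma_append (c0 :: u0) t hu]
      cases hsp : pvSplitComma t with
      | nil => exact absurd hsp (pvSplitComma_ne_nil t)
      | cons h r =>
        obtain ⟨rest, hrest'⟩ := pvSplitComma_head_prefix t h r hsp
        have hconv := slice_eq_drop_one (c0 :: u0 ++ ',' :: t) h rest (c0 :: u0).length
          (by rw [hdropu, hrest'])
        simp only [List.map_cons, List.singleton_append]
        have hcast2 : ((((c0 :: u0).length + 1 : Nat) : Int) + (h.length : Int))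
            = (((c0 :: u0).length : Int) + 1 + (h.length : Int)) := by push_cast; ring
        rw [hcast2, hconv]
  · -- no comma: the fold is the identity, flag stays false
    rw [foldl_stepA_no_comma _ _ _ (enumerate_no_comma _ hmem 0)]
    simp [pvSplitComma_no_comma _ hmem, String.ofList_toList]
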